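-- pv_equiv track=rewrite | github.com/QuBenhao/LeetCode | problems/problems_3592/solution.py | findCoins
-- ===== SOURCE A (Python) =====
-- from typing import List
--
-- def findCoins(numWays: List[int]) -> List[int]:
--     n = len(numWays)
--     dp = [0] * (n + 1)
--     dp[0] = 1
--     ans = []
--     for i in range(1, n + 1):
--         cur = numWays[i - 1]
--         if dp[i] == cur - 1:
--             ans.append(i)
--             dp[i] += 1
--             for j in range(i + 1, n + 1):
--                 dp[j] += dp[j-i]
--         elif dp[i] != cur:
--             return []
--     return ans
-- ===== SOURCE B (Python) =====
-- def findCoins(numWays):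
--     # Deconvolution: treat [1]+numWays as a power series F and strip factors
--     # 1/(1-x^i): whenever the residual coefficient f[i] is 1, coin i must be
--     # present, so multiply by (1-x^i) (f[j] -= f[j-i], descending).  The input
--     # is consistent iff the residual series ends up equal to 1.
--     n = len(numWays)
--     f = [1] + list(numWays)
--     coins = []
--     for i in range(1, n + 1):
--         if f[i] == 1:
--             coins.append(i)
--             for j in range(n, i - 1, -1):
--                 f[j] -= f[j - i]
--     return coins if not any(f[1:]) else []
-- ===== Notes on version B (the rewrite author's own statement) =====
-- stated objective: alternative
-- what changed: A builds a ways-count dp from scratch bottom-up (dp[j]+=dp[j-i] forward) and compares it against numWays with an early return; B runs the inverse computation: it deconvolves the input power series itself (constant term 1, then the numWays coefficients), stripping a factor (1-x^i) by the descending subtraction f[j]-=f[j-i] whenever the residual coefficient at i equals one, and accepts iff the residual series reduces to the constant series.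
import Mathlib
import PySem

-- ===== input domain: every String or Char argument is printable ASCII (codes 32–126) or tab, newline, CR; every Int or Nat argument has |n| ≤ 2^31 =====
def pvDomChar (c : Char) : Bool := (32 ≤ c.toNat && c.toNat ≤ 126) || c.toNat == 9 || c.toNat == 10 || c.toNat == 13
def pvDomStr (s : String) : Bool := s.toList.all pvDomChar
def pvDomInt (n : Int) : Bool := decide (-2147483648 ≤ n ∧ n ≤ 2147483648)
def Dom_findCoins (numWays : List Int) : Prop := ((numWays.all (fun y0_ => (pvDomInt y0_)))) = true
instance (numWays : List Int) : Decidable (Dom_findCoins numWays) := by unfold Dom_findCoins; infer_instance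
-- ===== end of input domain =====

-- B replaces A's forward ways-count DP (build dp from scratch, compare to numWays,
-- early return) by the inverse computation: deconvolve the input power series itself,
-- stripping a factor (1-x^i) whenever the residual coefficient at i is 1
-- (objective: alternative algorithm, same asymptotic cost).

-- ===== PORT A =====
-- A's inner loop 'for j in range(i+1, n+1): dp[j] += dp[j-i]'
-- (indices are Nat: every j touched satisfies j ≥ i+1 > i ≥ 0, exact for this code)
def knapA (i : Nat) (dp : List Int) (js : List Nat) : List Int :=
  js.foldl (fun d j => d.set j (d.getD j 0 + d.getD (j - i) 0)) dp

-- A's main loop: walks numWays with current amount i, early-returns [] on a mismatch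
def loopA (n : Nat) : List Int → Nat → List Int → List Int → List Int
  | [], _, _, ans => ans
  | cur :: rest, i, dp, ans =>
    if dp.getD i 0 = cur - 1 then
      loopA n rest (i+1)
        (knapA i (dp.set i (dp.getD i 0 + 1)) (List.range' (i+1) (n - i)))
        (ans ++ [(i : Int)])
    else if dp.getD i 0 ≠ cur then []
    else loopA n rest (i+1) dp ans

def findCoins (numWays : List Int) : List Int :=
  let n := numWays.length
  loopA n numWays 1 ((List.replicate (n+1) (0:Int)).set 0 1) []

-- ===== PORT B =====
-- B's inner loop 'for j in range(n, i-1, -1): f[j] -= f[j-i]'; the processed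
-- indices are exactly n, n-1, …, i, i.e. (range' i (n+1-i)).reverse (exact)
def stripB (i : Nat) (f : List Int) (js : List Nat) : List Int :=
  js.foldl (fun d j => d.set j (d.getD j 0 - d.getD (j - i) 0)) f

-- one iteration of B's main loop 'for i in range(1, n+1)'
def stepB (n : Nat) (st : List Int × List Int) (i : Nat) : List Int × List Int :=
  if st.1.getD i 0 = 1 then
    (stripB i st.1 ((List.range' i (n + 1 - i)).reverse), st.2 ++ [(i : Int)])
  else st

def findCoins_alt (numWays : List Int) : List Int :=
  let n := numWays.length
  let s := (List.range' 1 n).foldl (stepB n) ((1 : Int) :: numWays, [])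
  -- 'return coins if not any(f[1:]) else []' (ints: truthy = nonzero, exact)
  if (s.1.drop 1).all (fun x => x == 0) then s.2 else []

-- ===== PRECONDITION & SPEC =====
def Spec_findCoins (numWays : List Int) (out : List Int) : Prop := out = findCoins_alt numWays
instance (numWays : List Int) (out : List Int) : Decidable (Spec_findCoins numWays out) := by unfold Spec_findCoins; infer_instance

-- ===== CLAIM (what is proved, stated in full; the proofs are below) =====
def Claim_equal_findCoins : Prop := ∀ (numWays : List Int), Dom_findCoins numWays → Spec_findCoins numWays (findCoins numWays)

-- ===== LEMMAS AND PROOFS =====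

-- basic getD/set facts
theorem pv_getD_set_ne (l : List Int) (i k : Nat) (v : Int) (h : i ≠ k) :
    (l.set i v).getD k 0 = l.getD k 0 := by
  simp [List.getD_eq_getElem?_getD, List.getElem?_set_ne h]

theorem pv_getD_set_self (l : List Int) (i : Nat) (v : Int) (h : i < l.length) :
    (l.set i v).getD i 0 = v := by
  simp [List.getD_eq_getElem?_getD, h]

-- the truncated convolution of two coefficient lists, at degree m
def conv (f g : List Int) (m : Nat) : Int :=
  ∑ t ∈ Finset.range (m+1), f.getD t 0 * g.getD (m - t) 0

-- ----- generic facts about the two inner update folds -----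
theorem knapA_length (i : Nat) (js : List Nat) (dp : List Int) :
    (knapA i dp js).length = dp.length := by
  induction js generalizing dp with
  | nil => rfl
  | cons j js ih => simp only [knapA, List.foldl_cons] at *; rw [ih]; simp

theorem knapA_getD_nmem (i k : Nat) (js : List Nat) (dp : List Int)
    (h : ∀ j ∈ js, j ≠ k) : (knapA i dp js).getD k 0 = dp.getD k 0 := by
  induction js generalizing dp with
  | nil => rfl
  | cons j js ih =>
    simp only [knapA, List.foldl_cons] at *
    rw [ih _ (fun x hx => h x (List.mem_cons_of_mem _ hx)),
        pv_getD_set_ne _ _ _ _ (h j (List.mem_cons_self))]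

theorem stripB_length (i : Nat) (js : List Nat) (f : List Int) :
    (stripB i f js).length = f.length := by
  induction js generalizing f with
  | nil => rfl
  | cons j js ih => simp only [stripB, List.foldl_cons] at *; rw [ih]; simp

theorem stripB_getD_nmem (i k : Nat) (js : List Nat) (f : List Int)
    (h : ∀ j ∈ js, j ≠ k) : (stripB i f js).getD k 0 = f.getD k 0 := by
  induction js generalizing f with
  | nil => rfl
  | cons j js ih =>
    simp only [stripB, List.foldl_cons] at *
    rw [ih _ (fun x hx => h x (List.mem_cons_of_mem _ hx)),
        pv_getD_set_ne _ _ _ _ (h j (List.mem_cons_self))]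

-- A's inner loop satisfies the division recurrence r[j] = dp[j] + r[j-i] on its range
theorem knapA_char (i : Nat) (len : Nat) : ∀ (s : Nat) (d : List Int), 1 ≤ i → i < s →
    s + len ≤ d.length →
    ∀ j, s ≤ j → j < s + len →
      (knapA i d (List.range' s len)).getD j 0
        = d.getD j 0 + (knapA i d (List.range' s len)).getD (j - i) 0 := by
  induction len with
  | zero => intro s d _ _ _ j h1 h2; omega
  | succ len ih =>
    intro s d hi1 his hlen j h1 h2
    rw [List.range'_succ]
    simp only [knapA, List.foldl_cons]
    set d' := d.set s (d.getD s 0 + d.getD (s - i) 0) with hd'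
    by_cases hj : j = s
    · subst hj
      have h0 : ∀ x ∈ List.range' (j+1) len, x ≠ j := by
        intro x hx; have := List.mem_range'_1.mp hx; omega
      have h0' : ∀ x ∈ List.range' (j+1) len, x ≠ j - i := by
        intro x hx; have := List.mem_range'_1.mp hx; omega
      show (knapA i d' (List.range' (j+1) len)).getD j 0
          = d.getD j 0 + (knapA i d' (List.range' (j+1) len)).getD (j - i) 0
      rw [knapA_getD_nmem _ _ _ _ h0, knapA_getD_nmem _ _ _ _ h0']
      rw [hd', pv_getD_set_self _ _ _ (by omega), pv_getD_set_ne _ _ _ _ (by omega)]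
    · have hj' : s + 1 ≤ j := by omega
      have := ih (s+1) d' hi1 (by omega) (by rw [hd', List.length_set]; omega) j hj' (by omega)
      show (knapA i d' (List.range' (s+1) len)).getD j 0
          = d.getD j 0 + (knapA i d' (List.range' (s+1) len)).getD (j - i) 0
      rw [this, hd', pv_getD_set_ne _ _ _ _ (by omega)]

-- B's inner loop computes the pointwise multiplication by (1 - x^i) on its range
theorem stripB_char (i : Nat) (len : Nat) : ∀ (f : List Int), 1 ≤ i →
    i + len ≤ f.length →
    (∀ j, j ∈ List.range' i len →
      (stripB i f ((List.range' i len).reverse)).getD j 0 = f.getD j 0 - f.getD (j - i) 0)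
    ∧ (∀ t, t ∉ List.range' i len →
      (stripB i f ((List.range' i len).reverse)).getD t 0 = f.getD t 0) := by
  induction len with
  | zero => intro f _ _; constructor <;> intro j hj <;> simp_all [stripB]
  | succ len ih =>
    intro f hi hlen
    have hr : (List.range' i (len+1)).reverse = (i+len) :: (List.range' i len).reverse := by
      rw [List.range'_1_concat, List.reverse_append]; rfl
    rw [hr]
    simp only [stripB, List.foldl_cons]
    set f' := f.set (i+len) (f.getD (i+len) 0 - f.getD (i+len-i) 0) with hf'
    have hlen' : i + len ≤ f'.length := by rw [hf', List.length_set]; omega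
    obtain ⟨ih1, ih2⟩ := ih f' hi hlen'
    have htop : (i+len) ∉ List.range' i len := by
      intro hx; have := List.mem_range'_1.mp hx; omega
    constructor
    · intro j hj
      rw [List.mem_range'_1] at hj
      by_cases hje : j = i + len
      · subst hje
        show (stripB i f' ((List.range' i len).reverse)).getD (i+len) 0 = _
        rw [ih2 _ htop, hf', pv_getD_set_self _ _ _ (by omega)]
      · have hjm : j ∈ List.range' i len := by rw [List.mem_range'_1]; omega
        show (stripB i f' ((List.range' i len).reverse)).getD j 0 = _
        rw [ih1 _ hjm, hf', pv_getD_set_ne _ _ _ _ (by omega),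
            pv_getD_set_ne _ _ _ _ (by omega)]
    · intro t ht
      rw [List.mem_range'_1] at ht
      have ht1 : t ∉ List.range' i len := by
        intro hx; have := List.mem_range'_1.mp hx; omega
      have hne : t ≠ i + len := by omega
      show (stripB i f' ((List.range' i len).reverse)).getD t 0 = _
      rw [ih2 _ ht1, hf', pv_getD_set_ne _ _ _ _ (fun hx => hne hx.symm)]

-- ----- sum-shift lemmas for the convolution -----
theorem pv_sum_shift (h : Nat → Int) (i : Nat) (hi : 1 ≤ i) : ∀ m : Nat,
    (∑ t ∈ Finset.range (m+1), if i ≤ t then h (t - i) else 0)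
      = if i ≤ m then ∑ s ∈ Finset.range (m - i + 1), h s else 0 := by
  intro m
  induction m with
  | zero => rw [Finset.sum_range_one, if_neg (by omega), if_neg (by omega)]
  | succ m ihm =>
    rw [Finset.sum_range_succ, ihm]
    by_cases h1 : i ≤ m
    · rw [if_pos h1, if_pos (by omega), if_pos (by omega)]
      rw [show m + 1 - i = (m - i) + 1 from by omega]
      exact (Finset.sum_range_succ h (m - i + 1)).symm
    · by_cases h2 : i ≤ m + 1
      · have hieq : i = m + 1 := by omega
        rw [if_neg h1, if_pos h2, if_pos h2, hieq]
        simp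
      · rw [if_neg h1, if_neg (by omega), if_neg h2]
        simp

theorem pv_sum_trunc (h : Nat → Int) (i m : Nat) (hi : 1 ≤ i) :
    (∑ t ∈ Finset.range (m+1), if t + i ≤ m then h t else 0)
      = if i ≤ m then ∑ s ∈ Finset.range (m - i + 1), h s else 0 := by
  by_cases him : i ≤ m
  · rw [if_pos him]
    have hsub : Finset.range (m - i + 1) ⊆ Finset.range (m + 1) := by
      intro x hx; rw [Finset.mem_range] at *; omega
    rw [← Finset.sum_subset hsub
        (by intro x _ hx; rw [Finset.mem_range] at hx; rw [if_neg (by omega)])]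
    exact Finset.sum_congr rfl (by
      intro x hx; rw [Finset.mem_range] at hx; rw [if_pos (by omega)])
  · rw [if_neg him]
    exact Finset.sum_eq_zero (by intro x _; rw [if_neg (by omega)])

-- multiplying the left factor by (1 - x^i) subtracts a shifted convolution
theorem conv_sub (f f' g : List Int) (i n m : Nat) (hi : 1 ≤ i) (hm : m ≤ n)
    (hf : ∀ t, t ≤ n → f'.getD t 0 = f.getD t 0 - (if i ≤ t then f.getD (t - i) 0 else 0)) :
    conv f' g m = conv f g m - (if i ≤ m then conv f g (m - i) else 0) := by
  unfold conv
  have step : ∀ t ∈ Finset.range (m+1), f'.getD t 0 * g.getD (m - t) 0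
      = f.getD t 0 * g.getD (m - t) 0
        - (if i ≤ t then f.getD (t - i) 0 * g.getD ((m - i) - (t - i)) 0 else 0) := by
    intro t ht
    rw [Finset.mem_range] at ht
    rw [hf t (by omega)]
    by_cases hit : i ≤ t
    · rw [if_pos hit, if_pos hit, sub_mul]
      have : (m - i) - (t - i) = m - t := by omega
      rw [this]
    · rw [if_neg hit, if_neg hit]; ring
  rw [Finset.sum_congr rfl step, Finset.sum_sub_distrib]
  congr 1
  have := pv_sum_shift (fun s => f.getD s 0 * g.getD ((m - i) - s) 0) i hi m
  simp only at this
  rw [this]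

-- A's division recurrence on the right factor removes the shifted convolution
theorem conv_div (f g g' : List Int) (i n m : Nat) (hi : 1 ≤ i) (hm : m ≤ n)
    (hg : ∀ s, s ≤ n → g'.getD s 0 = g.getD s 0 + (if i ≤ s then g'.getD (s - i) 0 else 0)) :
    conv f g' m = conv f g m + (if i ≤ m then conv f g' (m - i) else 0) := by
  unfold conv
  have step : ∀ t ∈ Finset.range (m+1), f.getD t 0 * g'.getD (m - t) 0
      = f.getD t 0 * g.getD (m - t) 0
        + (if t + i ≤ m then f.getD t 0 * g'.getD ((m - i) - t) 0 else 0) := by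
    intro t ht
    rw [Finset.mem_range] at ht
    rw [hg (m - t) (by omega)]
    by_cases hit : t + i ≤ m
    · rw [if_pos (by omega : i ≤ m - t), if_pos hit, mul_add]
      have : (m - t) - i = (m - i) - t := by omega
      rw [this]
    · rw [if_neg (by omega : ¬ i ≤ m - t), if_neg hit]; ring
  rw [Finset.sum_congr rfl step, Finset.sum_add_distrib]
  congr 1
  have := pv_sum_trunc (fun s => f.getD s 0 * g'.getD ((m - i) - s) 0) i m hi
  simp only at this
  rw [this]

-- with f = 1,0,…,0,f[i],… the convolution at i collapses to dp[i] + f[i]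
theorem conv_head (f dp : List Int) (i : Nat) (hi : 1 ≤ i) (hf0 : f.getD 0 0 = 1)
    (hdp0 : dp.getD 0 0 = 1) (hfz : ∀ t, 1 ≤ t → t < i → f.getD t 0 = 0) :
    conv f dp i = dp.getD i 0 + f.getD i 0 := by
  unfold conv
  rw [Finset.sum_range_succ]
  have h1 : ∑ t ∈ Finset.range i, f.getD t 0 * dp.getD (i - t) 0 = dp.getD i 0 := by
    rw [Finset.sum_eq_single_of_mem 0 (Finset.mem_range.mpr (by omega))
        (by intro b hb hb0; rw [Finset.mem_range] at hb
            rw [hfz b (by omega) hb, zero_mul])]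
    rw [hf0, Nat.sub_zero, one_mul]
  rw [h1, Nat.sub_self, hdp0, mul_one]

-- the initial dp of A is the series 1
theorem pv_dp0_getD (n s : Nat) :
    ((List.replicate (n+1) (0:Int)).set 0 1).getD s 0 = if s = 0 then 1 else 0 := by
  by_cases hs : s = 0
  · subst hs; rw [pv_getD_set_self _ _ _ (by simp)]; rfl
  · rw [pv_getD_set_ne _ _ _ _ (fun h => hs h.symm), if_neg hs]
    simp [List.getD_eq_getElem?_getD, List.getElem?_replicate]
    split <;> rfl

theorem conv_init (f : List Int) (n m : Nat) :
    conv f ((List.replicate (n+1) (0:Int)).set 0 1) m = f.getD m 0 := by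
  unfold conv
  rw [Finset.sum_eq_single_of_mem m (Finset.mem_range.mpr (by omega))
      (by intro b hb hbm; rw [Finset.mem_range] at hb
          rw [pv_dp0_getD n (m - b), if_neg (by omega), mul_zero])]
  rw [Nat.sub_self, pv_dp0_getD, if_pos rfl, mul_one]

-- ----- facts about B's outer fold -----
theorem foldB_fst_length (n : Nat) (len : Nat) : ∀ (s : Nat) (st : List Int × List Int),
    ((List.range' s len).foldl (stepB n) st).1.length = st.1.length := by
  induction len with
  | zero => intro s st; rfl
  | succ len ih =>
    intro s st
    rw [List.range'_succ, List.foldl_cons, ih]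
    unfold stepB
    split
    · rw [stripB_length]
    · rfl

theorem foldB_fst_getD_lt (n : Nat) (len : Nat) : ∀ (s k : Nat) (st : List Int × List Int),
    k < s → ((List.range' s len).foldl (stepB n) st).1.getD k 0 = st.1.getD k 0 := by
  induction len with
  | zero => intro s k st _; rfl
  | succ len ih =>
    intro s k st hk
    rw [List.range'_succ, List.foldl_cons, ih (s+1) k _ (by omega)]
    unfold stepB
    split
    · exact stripB_getD_nmem _ _ _ _ (by
        intro j hj
        have := List.mem_range'_1.mp (List.mem_reverse.mp hj)
        omega)
    · rfl

-- ----- the main simultaneous-loop lemma -----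
theorem main_lemma (n : Nat) (rest : List Int) : ∀ (i : Nat) (dp f ans : List Int),
    1 ≤ i → i + rest.length = n + 1 →
    dp.length = n + 1 → f.length = n + 1 →
    dp.getD 0 0 = 1 → f.getD 0 0 = 1 →
    (∀ t, 1 ≤ t → t < i → f.getD t 0 = 0) →
    (∀ k, k < rest.length → conv f dp (i + k) = rest.getD k 0) →
    loopA n rest i dp ans =
      (if ((((List.range' i rest.length).foldl (stepB n) (f, ans)).1.drop 1).all
            (fun x => x == 0))
       then ((List.range' i rest.length).foldl (stepB n) (f, ans)).2 else []) := by
  induction rest with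
  | nil =>
    intro i dp f ans hi hlen hdplen hflen hdp0 hf0 hfz hconv
    simp only [loopA, List.length_nil, List.range'_zero, List.foldl_nil]
    have hall : ((f.drop 1).all (fun x => x == 0)) = true := by
      rw [List.all_eq_true]
      intro x hx
      obtain ⟨j, hj, hxe⟩ := List.mem_iff_getElem.mp hx
      rw [List.getElem_drop] at hxe
      have hjlen : 1 + j < f.length := by
        rw [List.length_drop] at hj; omega
      have : f.getD (1+j) 0 = x := by
        rw [List.getD_eq_getElem f 0 hjlen]; exact hxe
      have hz : f.getD (1+j) 0 = 0 := by
        apply hfz _ (by omega)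
        rw [List.length_nil] at hlen
        omega
      rw [hz] at this
      simp [← this]
    rw [hall, if_pos rfl]
  | cons cur rest ih =>
    intro i dp f ans hi hlen hdplen hflen hdp0 hf0 hfz hconv
    have hin : i ≤ n := by simp at hlen; omega
    have hcuri : dp.getD i 0 + f.getD i 0 = cur := by
      have := hconv 0 (by simp)
      rw [Nat.add_zero, conv_head f dp i hi hf0 hdp0 hfz] at this
      simpa using this
    simp only [List.length_cons]
    rw [List.range'_succ, List.foldl_cons]
    simp only [loopA]
    by_cases hA : dp.getD i 0 = cur - 1
    · -- coin i found by both
      have hfi : f.getD i 0 = 1 := by omega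
      rw [if_pos hA]
      have hstep : stepB n (f, ans) i
          = (stripB i f ((List.range' i (n + 1 - i)).reverse), ans ++ [(i : Int)]) := by
        unfold stepB; rw [if_pos hfi]
      rw [hstep]
      set fn := stripB i f ((List.range' i (n + 1 - i)).reverse) with hfn
      set dpn := knapA i (dp.set i (dp.getD i 0 + 1)) (List.range' (i+1) (n - i)) with hdpn
      obtain ⟨hsc1, hsc2⟩ := stripB_char i (n + 1 - i) f hi (by omega)
      have hfnlen : fn.length = n + 1 := by rw [hfn, stripB_length, hflen]
      have hdpnlen : dpn.length = n + 1 := by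
        rw [hdpn, knapA_length, List.length_set, hdplen]
      have hdpn0 : dpn.getD 0 0 = 1 := by
        rw [hdpn, knapA_getD_nmem _ _ _ _ (by
          intro j hj; have := List.mem_range'_1.mp hj; omega)]
        rw [pv_getD_set_ne _ _ _ _ (by omega), hdp0]
      have hfn0 : fn.getD 0 0 = 1 := by
        rw [hfn, hsc2 0 (by intro hx; have := List.mem_range'_1.mp hx; omega), hf0]
      -- full pointwise characterizations up to n
      have charB : ∀ t, t ≤ n →
          fn.getD t 0 = f.getD t 0 - (if i ≤ t then f.getD (t - i) 0 else 0) := by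
        intro t ht
        by_cases hit : i ≤ t
        · rw [if_pos hit, hfn, hsc1 t (List.mem_range'_1.mpr (by omega))]
        · rw [if_neg hit, hfn,
             hsc2 t (by intro hx; have := List.mem_range'_1.mp hx; omega), sub_zero]
      have charA : ∀ s, s ≤ n →
          dpn.getD s 0 = dp.getD s 0 + (if i ≤ s then dpn.getD (s - i) 0 else 0) := by
        intro s hs
        rcases Nat.lt_trichotomy s i with hsi | hsi | hsi
        · rw [if_neg (by omega), hdpn, knapA_getD_nmem _ _ _ _ (by
            intro j hj; have := List.mem_range'_1.mp hj; omega),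
            pv_getD_set_ne _ _ _ _ (by omega), add_zero]
        · subst hsi
          rw [if_pos le_rfl, Nat.sub_self, hdpn0, hdpn, knapA_getD_nmem _ _ _ _ (by
            intro j hj; have := List.mem_range'_1.mp hj; omega),
            pv_getD_set_self _ _ _ (by omega)]
        · rw [if_pos (by omega), hdpn,
            knapA_char i (n - i) (i+1) _ hi (by omega)
              (by rw [List.length_set, hdplen]; omega) s (by omega) (by omega),
            pv_getD_set_ne _ _ _ _ (by omega)]
      have hfzn : ∀ t, 1 ≤ t → t < i + 1 → fn.getD t 0 = 0 := by
        intro t h1 h2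
        by_cases hti : t = i
        · subst hti
          rw [charB t (by omega), if_pos le_rfl, Nat.sub_self, hf0, hfi]; ring
        · rw [charB t (by omega), if_neg (by omega), sub_zero]
          exact hfz t h1 (by omega)
      have hconvn : ∀ k, k < rest.length → conv fn dpn ((i+1) + k) = rest.getD k 0 := by
        intro k hk
        have hmn : (i+1) + k ≤ n := by simp at hlen; omega
        rw [conv_sub f fn dpn i n _ hi hmn charB,
            conv_div f dp dpn i n _ hi hmn charA]
        have : conv f dp ((i+1)+k) = rest.getD k 0 := by
          have := hconv (k+1) (by simp; omega)
          have he : i + (k+1) = (i+1) + k := by omega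
          rw [he] at this
          simpa using this
        rw [this]; ring
      have := ih (i+1) dpn fn (ans ++ [(i : Int)]) (by omega) (by simp at hlen ⊢; omega)
        hdpnlen hfnlen hdpn0 hfn0 hfzn hconvn
      exact this
    · rw [if_neg hA]
      have hfi1 : f.getD i 0 ≠ 1 := by omega
      have hstep : stepB n (f, ans) i = (f, ans) := by
        unfold stepB; rw [if_neg hfi1]
      rw [hstep]
      by_cases hB : dp.getD i 0 = cur
      · -- no coin at i, values match: both step on
        rw [if_neg (by simpa using hB)]
        exact ih (i+1) dp f ans (by omega) (by simp at hlen ⊢; omega) hdplen hflen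
          hdp0 hf0
          (by intro t h1 h2
              by_cases hti : t = i
              · subst hti; omega
              · exact hfz t h1 (by omega))
          (by intro k hk
              have := hconv (k+1) (by simp; omega)
              have he : i + (k+1) = (i+1) + k := by omega
              rw [he] at this
              simpa using this)
      · -- mismatch: A returns [] now, B's final residual is nonzero at index i
        rw [if_pos (by simpa using hB)]
        have hfi0 : f.getD i 0 ≠ 0 := by omega
        set F := ((List.range' (i+1) rest.length).foldl (stepB n) (f, ans)).1 with hF
        have hFi : F.getD i 0 = f.getD i 0 := foldB_fst_getD_lt n _ _ _ _ (by omega)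
        have hFlen : F.length = n + 1 := by rw [hF, foldB_fst_length]; exact hflen
        have hfail : ((F.drop 1).all (fun x => x == 0)) = false := by
          rw [List.all_eq_false]
          refine ⟨F.getD i 0, ?_, ?_⟩
          · have hidx : i - 1 < (F.drop 1).length := by
              rw [List.length_drop]; omega
            have heq : (F.drop 1)[i-1] = F.getD i 0 := by
              rw [List.getElem_drop, List.getD_eq_getElem F 0 (by omega)]
              congr 1
              omega
            rw [← heq]
            exact List.getElem_mem hidx
          · have hne : F.getD i 0 ≠ 0 := by rw [hFi]; exact hfi0
            simp only [beq_iff_eq]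
            exact hne
        rw [hfail]
        simp
-- ===== VERDICT (by name: the statement is the Claim_ definition above) =====
theorem findCoins_spec : Claim_equal_findCoins := by
  intro numWays _
  unfold Spec_findCoins findCoins findCoins_alt
  simp only []
  have := main_lemma numWays.length numWays 1
    ((List.replicate (numWays.length + 1) (0:Int)).set 0 1)
    ((1:Int) :: numWays) [] le_rfl (by omega)
    (by simp) (by simp)
    (by rw [pv_getD_set_self _ _ _ (by simp)])
    (by rfl)
    (by intro t h1 h2; omega)
    (by intro k hk
        rw [conv_init, show 1 + k = k + 1 from by omega]
        rfl)
  exact this
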